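-- pv_equiv track=rewrite | github.com/ErikHeller/ki-coding-challenge | 5Gewinnt.py | findlastvalues
-- ===== SOURCE A (Python) =====
-- def last_element(state):
--     for i in range(len(state)):
--         if state[i] == 0:
--             return i - 1
--     return len(state) - 1
--
-- def findlastvalues(state):
--     a, b = 0, 0
--     last_e = last_element(state)
--     color = last_e % 2
--     for i in range(last_e + 1):
--         if state[last_e - i] != -1 and (last_e - i) % 2 == color and state[last_e - i] != 13:
--             a = last_e - i
--             break
--     for i in range(last_e + 1):
--         if state[last_e - i] != -1 and (last_e - i) % 2 != color and state[last_e - i] != 13: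
--             b = last_e - i
--             break
--     return a, b
-- ===== SOURCE B (Python) =====
-- def findlastvalues(state):
--     last_e = len(state) - 1
--     for i, v in enumerate(state):
--         if v == 0:
--             last_e = i - 1
--             break
--     color = last_e % 2
--     a = b = None
--     j = last_e
--     while j >= 0 and (a is None or b is None):
--         v = state[j]
--         if v != -1 and v != 13:
--             if j % 2 == color:
--                 if a is None:
--                     a = j
--             elif b is None:
--                 b = j
--         j -= 1
--     return (a if a is not None else 0, b if b is not None else 0)
-- ===== Notes on version B (the rewrite author's own statement) =====
-- stated objective: alternative
-- what changed: Replaces A's two independent backward scans over range(last_e+1) by a single backward pass that fills both answers (tracked as unset/set options) and stops as soon as both are found.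
import Mathlib
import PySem

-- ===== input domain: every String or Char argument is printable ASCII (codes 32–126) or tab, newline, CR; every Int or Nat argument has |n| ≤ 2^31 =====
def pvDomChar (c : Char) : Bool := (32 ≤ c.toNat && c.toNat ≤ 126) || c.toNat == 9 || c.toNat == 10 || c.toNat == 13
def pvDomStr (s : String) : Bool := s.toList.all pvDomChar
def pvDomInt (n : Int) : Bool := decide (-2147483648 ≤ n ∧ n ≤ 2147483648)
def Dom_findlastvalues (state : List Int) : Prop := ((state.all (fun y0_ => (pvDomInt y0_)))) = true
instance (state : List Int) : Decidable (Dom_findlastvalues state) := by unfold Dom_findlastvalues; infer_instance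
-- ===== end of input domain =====

-- B replaces A's two independent backward scans by one backward pass that fills both
-- answers and stops as soon as both are found (objective: alternative decomposition, single pass).

-- ===== PORT A =====
-- for i in range(len(state)): if state[i] == 0: return i - 1 / return len(state) - 1
def lastElementLoop (state : List Int) : List Int → Int
  | [] => (state.length : Int) - 1
  | i :: rest =>
    if PySem.List.pyGetD state i 0 = 0 then i - 1 else lastElementLoop state rest

def lastElement (state : List Int) : Int :=
  lastElementLoop state (PySem.List.pyRange 0 (state.length : Int) 1)

-- first for-loop of findlastvalues (break = return of the first hit, else a stays 0)
def findLoopA (state : List Int) (last_e color : Int) : List Int → Int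
  | [] => 0
  | i :: rest =>
    if PySem.List.pyGetD state (last_e - i) 0 ≠ -1 ∧
        PySem.Int.mod (last_e - i) 2 = color ∧
        PySem.List.pyGetD state (last_e - i) 0 ≠ 13 then
      last_e - i
    else findLoopA state last_e color rest

-- second for-loop (parity different from color)
def findLoopB (state : List Int) (last_e color : Int) : List Int → Int
  | [] => 0
  | i :: rest =>
    if PySem.List.pyGetD state (last_e - i) 0 ≠ -1 ∧
        PySem.Int.mod (last_e - i) 2 ≠ color ∧
        PySem.List.pyGetD state (last_e - i) 0 ≠ 13 then
      last_e - i
    else findLoopB state last_e color rest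

def findlastvalues (state : List Int) : Int × Int :=
  let last_e := lastElement state
  let color := PySem.Int.mod last_e 2
  (findLoopA state last_e color (PySem.List.pyRange 0 (last_e + 1) 1),
   findLoopB state last_e color (PySem.List.pyRange 0 (last_e + 1) 1))

-- ===== PORT B =====
-- for i, v in enumerate(state): if v == 0: last_e = i - 1; break  (default len-1)
def lastEAltLoop (n : Int) : List (Int × Int) → Int
  | [] => n - 1
  | (i, v) :: rest => if v = 0 then i - 1 else lastEAltLoop n rest

-- while j >= 0 and (a is None or b is None): …  (fuel = j + 1, j = k in the k+1 case)
def downLoop (state : List Int) (color : Int) : Nat → Option Int → Option Int → Int × Int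
  | 0, a, b => (a.getD 0, b.getD 0)
  | k + 1, a, b =>
    if a.isSome && b.isSome then (a.getD 0, b.getD 0)
    else
      let j : Int := (k : Int)
      let v := PySem.List.pyGetD state j 0
      if v ≠ -1 ∧ v ≠ 13 then
        if PySem.Int.mod j 2 = color then
          downLoop state color k (if a.isNone then some j else a) b
        else
          downLoop state color k a (if b.isNone then some j else b)
      else downLoop state color k a b

def findlastvalues_alt (state : List Int) : Int × Int :=
  let last_e := lastEAltLoop (state.length : Int) (PySem.List.enumerate state 0)
  let color := PySem.Int.mod last_e 2
  downLoop state color (last_e + 1).toNat none none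

-- ===== PRECONDITION & SPEC =====
def Spec_findlastvalues (state : List Int) (out : Int × Int) : Prop := out = findlastvalues_alt state
instance (state : List Int) (out : Int × Int) : Decidable (Spec_findlastvalues state out) := by unfold Spec_findlastvalues; infer_instance

-- ===== CLAIM (what is proved, stated in full; the proofs are below) =====
def Claim_equal_findlastvalues : Prop := ∀ (state : List Int), Dom_findlastvalues state → Spec_findlastvalues state (findlastvalues state)

-- ===== LEMMAS AND PROOFS =====

-- common characterisation of the "last element" computed by both programs
def lastSpec (state : List Int) : Int :=
  match state.findIdx? (fun v => v == 0) with
  | some i => (i : Int) - 1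
  | none => (state.length : Int) - 1

theorem lastElementLoop_eq (state : List Int) :
    ∀ (suf : List Int) (s : Nat), state.drop s = suf → s + suf.length = state.length →
      lastElementLoop state (PySem.List.pyRange (s : Int) (state.length : Int) 1) =
        (match suf.findIdx? (fun v => v == 0) with
         | some i => ((s + i : Nat) : Int) - 1
         | none => (state.length : Int) - 1) := by
  intro suf
  induction suf with
  | nil =>
    intro s hdrop hlen
    have hs : (s : Int) = (state.length : Int) := by simp at hlen; omega
    rw [hs, PySem.List.pyRange_one_eq_nil (by omega)]
    simp [lastElementLoop]
  | cons v rest ih =>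
    intro s hdrop hlen
    have hslt : s < state.length := by simp at hlen; omega
    have hget : state[s]'hslt = v := by
      have h0 : (state.drop s)[0]'(by simp [hdrop]) = v := by simp [hdrop]
      rw [List.getElem_drop] at h0
      simpa using h0
    rw [PySem.List.pyRange_one_cons (by exact_mod_cast hslt)]
    have hgd : PySem.List.pyGetD state (s : Int) 0 = v := by
      rw [PySem.List.pyGetD_natCast]
      simp [List.getD, hslt, hget]
    simp only [lastElementLoop, hgd]
    by_cases hv : v = 0
    · simp [hv, List.findIdx?_cons]
    · have hrest : state.drop (s + 1) = rest := by
        have : (state.drop s).drop 1 = rest := by simp [hdrop]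
        simpa [List.drop_drop] using this
      have hlen' : (s + 1) + rest.length = state.length := by simp at hlen ⊢; omega
      have := ih (s + 1) hrest hlen'
      have hcast : ((s : Int) + 1) = ((s + 1 : Nat) : Int) := by push_cast; ring
      rw [hcast] at *
      simp only [if_neg hv]
      rw [this]
      cases hfi : rest.findIdx? (fun v => v == 0) with
      | none => simp [List.findIdx?_cons, hv, hfi]
      | some i =>
        simp [List.findIdx?_cons, hv, hfi]
        ring

theorem lastElement_eq (state : List Int) : lastElement state = lastSpec state := by
  unfold lastElement lastSpec
  have := lastElementLoop_eq state state 0 (by simp) (by simp)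
  simpa using this

theorem lastEAltLoop_eq (n : Int) :
    ∀ (xs : List Int) (s : Int),
      lastEAltLoop n (PySem.List.enumerate xs s) =
        (match xs.findIdx? (fun v => v == 0) with
         | some i => (s + i) - 1
         | none => n - 1) := by
  intro xs
  induction xs with
  | nil => intro s; simp [PySem.List.enumerate_nil, lastEAltLoop]
  | cons v rest ih =>
    intro s
    rw [PySem.List.enumerate_cons]
    by_cases hv : v = 0
    · simp [lastEAltLoop, hv, List.findIdx?_cons]
    · simp only [lastEAltLoop, if_neg hv]
      rw [ih (s + 1)]
      cases hfi : rest.findIdx? (fun v => v == 0) with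
      | none => simp [List.findIdx?_cons, hv, hfi]
      | some i =>
        simp [List.findIdx?_cons, hv, hfi]
        ring

theorem lastSpec_ge (state : List Int) : -1 ≤ lastSpec state := by
  unfold lastSpec
  cases h : state.findIdx? (fun v => v == 0) with
  | none => simp; omega
  | some i => simp; omega

-- first hit scanning j = k-1, k-2, …, 0 with A's first-loop condition; 0 if none
def descA (state : List Int) (color : Int) : Nat → Int
  | 0 => 0
  | k + 1 =>
    if PySem.List.pyGetD state (k : Int) 0 ≠ -1 ∧
        PySem.Int.mod (k : Int) 2 = color ∧
        PySem.List.pyGetD state (k : Int) 0 ≠ 13 then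
      (k : Int)
    else descA state color k

def descB (state : List Int) (color : Int) : Nat → Int
  | 0 => 0
  | k + 1 =>
    if PySem.List.pyGetD state (k : Int) 0 ≠ -1 ∧
        PySem.Int.mod (k : Int) 2 ≠ color ∧
        PySem.List.pyGetD state (k : Int) 0 ≠ 13 then
      (k : Int)
    else descB state color k

theorem findLoopA_eq (state : List Int) (last_e color : Int) :
    ∀ (m : Nat) (a : Int), a + m = last_e + 1 →
      findLoopA state last_e color (PySem.List.pyRange a (last_e + 1) 1) = descA state color m := by
  intro m
  induction m with
  | zero =>
    intro a ha
    rw [PySem.List.pyRange_one_eq_nil (by omega)]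
    simp [findLoopA, descA]
  | succ k ih =>
    intro a ha
    rw [PySem.List.pyRange_one_cons (by omega)]
    have hj : last_e - a = (k : Int) := by push_cast at ha ⊢; omega
    simp only [findLoopA, hj, descA]
    split_ifs with h
    · rfl
    · exact ih (a + 1) (by push_cast at ha ⊢; omega)

theorem findLoopB_eq (state : List Int) (last_e color : Int) :
    ∀ (m : Nat) (a : Int), a + m = last_e + 1 →
      findLoopB state last_e color (PySem.List.pyRange a (last_e + 1) 1) = descB state color m := by
  intro m
  induction m with
  | zero =>
    intro a ha
    rw [PySem.List.pyRange_one_eq_nil (by omega)]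
    simp [findLoopB, descB]
  | succ k ih =>
    intro a ha
    rw [PySem.List.pyRange_one_cons (by omega)]
    have hj : last_e - a = (k : Int) := by push_cast at ha ⊢; omega
    simp only [findLoopB, hj, descB]
    split_ifs with h
    · rfl
    · exact ih (a + 1) (by push_cast at ha ⊢; omega)

theorem descA_succ (state : List Int) (color : Int) (k : Nat) :
    descA state color (k + 1) =
      (if PySem.List.pyGetD state (k : Int) 0 ≠ -1 ∧ PySem.Int.mod (k : Int) 2 = color ∧
          PySem.List.pyGetD state (k : Int) 0 ≠ 13 then (k : Int) else descA state color k) := rfl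

theorem descB_succ (state : List Int) (color : Int) (k : Nat) :
    descB state color (k + 1) =
      (if PySem.List.pyGetD state (k : Int) 0 ≠ -1 ∧ PySem.Int.mod (k : Int) 2 ≠ color ∧
          PySem.List.pyGetD state (k : Int) 0 ≠ 13 then (k : Int) else descB state color k) := rfl

theorem downLoop_inv (state : List Int) (color : Int) :
    ∀ (k : Nat) (a b : Option Int),
      downLoop state color k a b =
        (a.getD (descA state color k), b.getD (descB state color k)) := by
  intro k
  induction k with
  | zero => intro a b; simp [downLoop, descA, descB]
  | succ k ih =>
    intro a b
    unfold downLoop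
    by_cases hab : a.isSome && b.isSome
    · rw [if_pos hab]
      cases a with
      | none => simp at hab
      | some x =>
        cases b with
        | none => simp at hab
        | some y => simp
    · rw [if_neg hab]
      simp only []
      set v := PySem.List.pyGetD state (k : Int) 0 with hv
      by_cases h1 : v ≠ -1 ∧ v ≠ 13
      · rw [if_pos h1]
        by_cases h2 : PySem.Int.mod (k : Int) 2 = color
        · rw [if_pos h2, ih]
          have hdA : descA state color (k + 1) = (k : Int) := by
            rw [descA_succ, if_pos ⟨h1.1, h2, h1.2⟩]
          have hdB : descB state color (k + 1) = descB state color k := by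
            rw [descB_succ, if_neg (by tauto)]
          rw [hdA, hdB]
          cases a with
          | none => simp
          | some x => simp
        · rw [if_neg h2, ih]
          have hdA : descA state color (k + 1) = descA state color k := by
            rw [descA_succ, if_neg (by tauto)]
          have hdB : descB state color (k + 1) = (k : Int) := by
            rw [descB_succ, if_pos ⟨h1.1, h2, h1.2⟩]
          rw [hdA, hdB]
          cases b with
          | none => simp
          | some y => simp
      · rw [if_neg h1, ih]
        have hdA : descA state color (k + 1) = descA state color k := by
          rw [descA_succ, if_neg (by tauto)]
        have hdB : descB state color (k + 1) = descB state color k := by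
          rw [descB_succ, if_neg (by tauto)]
        rw [hdA, hdB]

-- ===== VERDICT (by name: the statement is the Claim_ definition above) =====
theorem findlastvalues_spec : Claim_equal_findlastvalues := by
  intro state _
  unfold Spec_findlastvalues findlastvalues findlastvalues_alt
  have hle : lastEAltLoop (state.length : Int) (PySem.List.enumerate state 0) = lastSpec state := by
    rw [lastEAltLoop_eq]
    unfold lastSpec
    cases h : state.findIdx? (fun v => v == 0) <;> simp
  rw [hle, ← lastElement_eq state] at *
  set le := lastElement state with hledef
  have hge : -1 ≤ le := by rw [hledef, lastElement_eq]; exact lastSpec_ge state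
  have hm : (0 : Int) + ((le + 1).toNat : Int) = le + 1 := by omega
  simp only [downLoop_inv, Option.getD_none]
  rw [findLoopA_eq state le _ (le + 1).toNat 0 (by omega),
      findLoopB_eq state le _ (le + 1).toNat 0 (by omega)]
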